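-- pv_equiv track=rewrite | github.com/bereamanuel/metodosNumericos | Polinomios/python/hermite.py | hermite
-- ===== SOURCE A (Python) =====
-- def hermite(x, n):
--     """
--     Función que nos devuelve el valor del polinomio de Hermite de grado n en un punto x
--     """
--     import sympy as sym
--     if n == 0 :
--         return(1)
--     elif n == 1 :
--         return(2*x)
--     else:
--         return( 2*x*hermite(x,n-1) - 2*(n-1)*hermite(x,n-2) )
-- ===== SOURCE B (Python) =====
-- def hermite(x, n):
--     """Hermite polynomial H_n(x): bottom-up recurrence keeping the last two values (O(n) instead of A's exponential recursion)."""
--     if n == 0: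
--         return 1
--     prev, cur = 1, 2 * x
--     for k in range(1, n):
--         prev, cur = cur, 2 * x * cur - 2 * k * prev
--     return cur
-- ===== Notes on version B (the rewrite author's own statement) =====
-- stated objective: faster
-- what changed: Replaced the naive exponential double recursion by an iterative bottom-up recurrence that keeps only the last two values.
import Mathlib
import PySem

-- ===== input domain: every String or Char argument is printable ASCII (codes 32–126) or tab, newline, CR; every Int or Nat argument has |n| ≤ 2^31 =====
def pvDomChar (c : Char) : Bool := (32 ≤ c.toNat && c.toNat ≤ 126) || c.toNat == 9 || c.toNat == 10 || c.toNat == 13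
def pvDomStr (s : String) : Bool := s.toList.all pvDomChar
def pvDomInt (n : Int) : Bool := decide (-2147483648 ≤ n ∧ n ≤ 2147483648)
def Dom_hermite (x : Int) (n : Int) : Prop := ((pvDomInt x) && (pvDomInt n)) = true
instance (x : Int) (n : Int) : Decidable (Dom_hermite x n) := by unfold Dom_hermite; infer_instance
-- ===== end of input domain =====

-- B replaces A's exponential double recursion by an O(n) bottom-up recurrence keeping the last two values.

-- ===== PORT A =====
-- A's recursion descends on n; on Int that is not structural, so the port recurses
-- on the Nat image of n, which mirrors A's branches exactly for all n ≥ 0 (A raises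
-- RecursionError for n < 0, excluded by Pre_).
def hermiteA (x : Int) : Nat → Int
  | 0 => 1
  | 1 => 2 * x
  | m + 2 => 2 * x * hermiteA x (m + 1) - 2 * ((m : Int) + 1) * hermiteA x m

def hermite (x : Int) (n : Int) : Int := hermiteA x n.toNat

-- ===== PORT B =====
def hermite_alt (x : Int) (n : Int) : Int :=
  if n == 0 then 1
  else
    ((PySem.List.pyRange 1 n 1).foldl
      (fun (p : Int × Int) (k : Int) => (p.2, 2 * x * p.2 - 2 * k * p.1))
      (1, 2 * x)).2

-- ===== PRECONDITION & SPEC =====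
-- A recurses on n-1 and n-2 with base cases 0 and 1, so it raises RecursionError for n < 0.
def Pre_hermite (x : Int) (n : Int) : Prop := 0 ≤ n
instance (x : Int) (n : Int) : Decidable (Pre_hermite x n) := by unfold Pre_hermite; infer_instance
def pvWitness_hermite : Int × Int := (3, 5)

def Spec_hermite (x : Int) (n : Int) (out : Int) : Prop := out = hermite_alt x n
instance (x : Int) (n : Int) (out : Int) : Decidable (Spec_hermite x n out) := by unfold Spec_hermite; infer_instance

-- ===== CLAIM (what is proved, stated in full; the proofs are below) =====
def Claim_equal_hermite : Prop := ∀ (x : Int) (n : Int), Dom_hermite x n → Pre_hermite x n → Spec_hermite x n (hermite x n)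

-- ===== LEMMAS AND PROOFS =====

-- the fold over range(1, k+1) carries exactly (H_k, H_{k+1})
theorem fold_herm (x : Int) (k : Nat) :
    ((PySem.List.pyRange 1 ((k : Int) + 1) 1).foldl
      (fun (p : Int × Int) (j : Int) => (p.2, 2 * x * p.2 - 2 * j * p.1))
      (1, 2 * x)) = (hermiteA x k, hermiteA x (k + 1)) := by
  induction k with
  | zero =>
    simp [PySem.List.pyRange_one_eq_nil (by omega : (1:Int) ≤ 0 + 1), hermiteA]
  | succ k ih =>
    have hsplit : PySem.List.pyRange 1 (((k + 1 : Nat) : Int) + 1) 1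
        = PySem.List.pyRange 1 ((k : Int) + 1) 1 ++ [(k : Int) + 1] := by
      have := PySem.List.pyRange_one_succ_right (a := 1) (b := (k : Int) + 1) (by omega)
      push_cast
      simpa using this
    rw [hsplit, List.foldl_append, ih]
    simp [hermiteA]

theorem hermite_eq (x n : Int) (hn : 0 ≤ n) : hermite x n = hermite_alt x n := by
  unfold hermite hermite_alt
  by_cases h0 : n = 0
  · simp [h0, hermiteA]
  · have h1 : 1 ≤ n := by omega
    rcases Nat.exists_eq_add_of_le (by omega : 1 ≤ n.toNat) with ⟨k, hk⟩
    have hcast : (n.toNat : Int) = n := Int.toNat_of_nonneg hn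
    have hn' : n = (k : Int) + 1 := by omega
    rw [if_neg (by simpa using h0), hn', fold_herm x k]
    have : n.toNat = k + 1 := by omega
    simp [this]

-- ===== VERDICT (by name: the statement is the Claim_ definition above) =====
theorem hermite_spec : Claim_equal_hermite := by
  intro x n _ hpre
  unfold Spec_hermite
  exact hermite_eq x n hpre
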